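-- pv_equiv track=rewrite | github.com/micked/MODEST | mage_tool/DNA_tools.py | find_mutation_box
-- ===== SOURCE A (Python) =====
-- def find_mutation_box(parent, child):
--     """Find a mutation box based on parent and mutation
--
--     parent and mutation must be same length
--     """
--     if len(parent) != len(child):
--         raise ValueError("parent {} and child {} must be same length".format(len(parent), len(child)))
--
--     parent = parent.upper()
--     child = child.upper()
--
--     offset = 0
--     for p,m in zip(parent,child):
--         if p != m:
--             break
--         offset += 1
--
--     length = len(parent)
--     for p,m in zip(parent[::-1],child[::-1]):
--         if p != m:
--             break
--         length -= 1
--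
--     mut = "{}={}".format(parent[offset:length], child[offset:length])
--     return offset, mut
-- ===== SOURCE B (Python) =====
-- def find_mutation_box(parent, child):
--     """Find a mutation box based on parent and mutation
--
--     parent and mutation must be same length
--     """
--     if len(parent) != len(child):
--         raise ValueError("parent {} and child {} must be same length".format(len(parent), len(child)))
--
--     parent = parent.upper()
--     child = child.upper()
--
--     first = None
--     last = None
--     for i, (p, m) in enumerate(zip(parent, child)):
--         if p != m:
--             if first is None:
--                 first = i
--             last = i
--
--     if first is None:
--         offset, length = len(parent), 0
--     else:
--         offset, length = first, last + 1
--
--     mut = "{}={}".format(parent[offset:length], child[offset:length])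
--     return offset, mut
-- ===== Notes on version B (the rewrite author's own statement) =====
-- stated objective: simpler
-- what changed: A scans forward for the common prefix and then scans zip(reversed(parent), reversed(child)) for the common suffix; B makes one forward pass over zip(parent, child) recording the first and last differing indices and derives offset/length from them (no reversal, no second loop).
import Mathlib
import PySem

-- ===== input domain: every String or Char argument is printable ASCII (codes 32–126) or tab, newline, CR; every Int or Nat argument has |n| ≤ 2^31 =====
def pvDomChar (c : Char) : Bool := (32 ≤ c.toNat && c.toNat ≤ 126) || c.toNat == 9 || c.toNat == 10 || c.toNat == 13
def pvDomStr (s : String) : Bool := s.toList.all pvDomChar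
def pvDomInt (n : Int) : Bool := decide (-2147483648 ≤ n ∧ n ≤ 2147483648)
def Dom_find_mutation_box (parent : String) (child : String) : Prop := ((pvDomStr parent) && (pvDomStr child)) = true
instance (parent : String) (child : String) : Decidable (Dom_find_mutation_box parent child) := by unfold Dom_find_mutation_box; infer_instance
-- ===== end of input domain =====

-- B replaces A's two break-loops (forward prefix scan plus a scan over the reversed strings)
-- by ONE forward pass recording the first and last differing index; objective: simpler (single pass).
-- Both A and B raise ValueError on unequal lengths; Pre_ excludes exactly those inputs.

-- ===== PORT A =====
-- A's first loop: 'offset = 0; for p,m in zip(...): if p != m: break; offset += 1'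
def pvAOff : List (Char × Char) → Int → Int
  | [], off => off
  | (p, m) :: t, off => if p ≠ m then off else pvAOff t (off + 1)

-- A's second loop: 'length = len(parent); for p,m in zip(rev,rev): if p != m: break; length -= 1'
def pvALen : List (Char × Char) → Int → Int
  | [], len => len
  | (p, m) :: t, len => if p ≠ m then len else pvALen t (len - 1)

def find_mutation_box (parent : String) (child : String) : Int × String :=
  let pu := PySem.Chars.upper parent.toList
  let cu := PySem.Chars.upper child.toList
  let offset := pvAOff (pu.zip cu) 0
  -- parent[::-1] is reversal (PySem.List.slice?_none_none_neg_one)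
  let length := pvALen (pu.reverse.zip cu.reverse) (pu.length : Int)
  let mutStr := String.ofList
    (PySem.List.slice pu (some offset) (some length) ++ '=' ::
     PySem.List.slice cu (some offset) (some length))
  (offset, mutStr)

-- ===== PORT B =====
-- B's single loop: 'for i,(p,m) in enumerate(zip(...)): if p != m: (first kept, last updated)'
def pvBLoop : List (Char × Char) → Int → Option Int × Option Int → Option Int × Option Int
  | [], _, st => st
  | (p, m) :: t, i, (fd, ld) =>
    if p ≠ m then pvBLoop t (i + 1) (some (fd.getD i), some i)
    else pvBLoop t (i + 1) (fd, ld)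

def find_mutation_box_alt (parent : String) (child : String) : Int × String :=
  let pu := PySem.Chars.upper parent.toList
  let cu := PySem.Chars.upper child.toList
  let st := pvBLoop (pu.zip cu) 0 (none, none)
  let ol : Int × Int :=
    match st with
    | (some f, some j) => (f, j + 1)
    | _ => ((pu.length : Int), 0)
  let mutStr := String.ofList
    (PySem.List.slice pu (some ol.1) (some ol.2) ++ '=' ::
     PySem.List.slice cu (some ol.1) (some ol.2))
  (ol.1, mutStr)

-- ===== PRECONDITION & SPEC =====
-- Pre_ excludes exactly the inputs of unequal length, on which A raises ValueError (B raises too).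
def Pre_find_mutation_box (parent : String) (child : String) : Prop :=
  parent.toList.length = child.toList.length
instance (parent : String) (child : String) : Decidable (Pre_find_mutation_box parent child) := by
  unfold Pre_find_mutation_box; infer_instance

def pvWitness_find_mutation_box : String × String := ("GATTaca", "GAcTacA")

def Spec_find_mutation_box (parent : String) (child : String) (out : Int × String) : Prop := out = find_mutation_box_alt parent child
instance (parent : String) (child : String) (out : Int × String) : Decidable (Spec_find_mutation_box parent child out) := by unfold Spec_find_mutation_box; infer_instance

-- ===== CLAIM (what is proved, stated in full; the proofs are below) =====
def Claim_equal_find_mutation_box : Prop := ∀ (parent : String) (child : String), Dom_find_mutation_box parent child → Pre_find_mutation_box parent child → Spec_find_mutation_box parent child (find_mutation_box parent child)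

-- ===== LEMMAS AND PROOFS =====

-- number of leading equal pairs
def pvCnt : List (Char × Char) → Nat
  | [] => 0
  | (p, m) :: t => if p = m then pvCnt t + 1 else 0

lemma pvAOff_eq (l : List (Char × Char)) (off : Int) : pvAOff l off = off + pvCnt l := by
  induction l generalizing off with
  | nil => simp [pvAOff, pvCnt]
  | cons x t ih =>
    obtain ⟨p, m⟩ := x
    by_cases h : p = m
    · simp [pvAOff, pvCnt, h, ih]; ring
    · simp [pvAOff, pvCnt, h]

lemma pvALen_eq (l : List (Char × Char)) (len : Int) : pvALen l len = len - pvCnt l := by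
  induction l generalizing len with
  | nil => simp [pvALen, pvCnt]
  | cons x t ih =>
    obtain ⟨p, m⟩ := x
    by_cases h : p = m
    · simp [pvALen, pvCnt, h, ih]; ring
    · simp [pvALen, pvCnt, h]

def pvAllEq (l : List (Char × Char)) : Prop := ∀ x ∈ l, x.1 = x.2

lemma pvCnt_eq_length (l : List (Char × Char)) (h : pvAllEq l) : pvCnt l = l.length := by
  induction l with
  | nil => simp [pvCnt]
  | cons x t ih =>
    obtain ⟨p, m⟩ := x
    have hp : p = m := h (p, m) (by simp)
    simp [pvCnt, hp, ih fun y hy => h y (by simp [hy])]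

lemma pvCnt_append_of_all (a b : List (Char × Char)) (h : pvAllEq a) :
    pvCnt (a ++ b) = a.length + pvCnt b := by
  induction a with
  | nil => simp
  | cons x t ih =>
    obtain ⟨p, m⟩ := x
    have hp : p = m := h (p, m) (by simp)
    simp [pvCnt, hp, ih fun y hy => h y (by simp [hy])]; omega

lemma pvCnt_append_of_not (a b : List (Char × Char)) (h : ¬ pvAllEq a) :
    pvCnt (a ++ b) = pvCnt a := by
  induction a with
  | nil => exact absurd (by intro x hx; simp at hx) h
  | cons x t ih =>
    obtain ⟨p, m⟩ := x
    by_cases hp : p = m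
    · have ht : ¬ pvAllEq t := by
        intro hall; exact h fun y hy => by
          rcases List.mem_cons.mp hy with h1 | h2
          · simp [h1, hp]
          · exact hall y h2
      simp [pvCnt, hp, ih ht]
    · simp [pvCnt, hp]

lemma pvAllEq_reverse (l : List (Char × Char)) (h : pvAllEq l) : pvAllEq l.reverse :=
  fun x hx => h x (List.mem_reverse.mp hx)

lemma pvNotAllEq_reverse (l : List (Char × Char)) (h : ¬ pvAllEq l) : ¬ pvAllEq l.reverse :=
  fun hall => h fun x hx => hall x (List.mem_reverse.mpr hx)

lemma pvBLoop_of_all (l : List (Char × Char)) (i : Int) (st : Option Int × Option Int)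
    (h : pvAllEq l) : pvBLoop l i st = st := by
  induction l generalizing i with
  | nil => rfl
  | cons x t ih =>
    obtain ⟨p, m⟩ := x
    obtain ⟨fd, ld⟩ := st
    have hp : p = m := h (p, m) (by simp)
    simp [pvBLoop, hp, ih (i + 1) fun y hy => h y (by simp [hy])]

-- index of the last differing pair, as an Int
def pvLast (l : List (Char × Char)) : Int := (l.length : Int) - 1 - pvCnt l.reverse

lemma pvBLoop_of_not (l : List (Char × Char)) (i : Int) (fd ld : Option Int)
    (h : ¬ pvAllEq l) :
    pvBLoop l i (fd, ld) = (some (fd.getD (i + pvCnt l)), some (i + pvLast l)) := by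
  induction l generalizing i fd ld with
  | nil => exact absurd (by intro x hx; simp at hx) h
  | cons x t ih =>
    obtain ⟨p, m⟩ := x
    have hrev : ((p, m) :: t).reverse = t.reverse ++ [(p, m)] := by simp
    by_cases hp : p = m
    · subst hp
      have ht : ¬ pvAllEq t := by
        intro hall; exact h fun y hy => by
          rcases List.mem_cons.mp hy with h1 | h2
          · simp [h1]
          · exact hall y h2
      have hc : pvCnt ((p, p) :: t).reverse = pvCnt t.reverse := by
        rw [hrev, pvCnt_append_of_not _ _ (pvNotAllEq_reverse t ht)]
      rw [show pvBLoop ((p, p) :: t) i (fd, ld) = pvBLoop t (i + 1) (fd, ld) by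
        simp [pvBLoop], ih (i + 1) fd ld ht]
      simp only [Prod.mk.injEq, Option.some.injEq]
      refine ⟨?_, ?_⟩
      · congr 1; simp only [pvCnt]; push_cast; ring
      · simp only [pvLast, hc, List.length_cons]; push_cast; ring
    · have hstep : pvBLoop ((p, m) :: t) i (fd, ld) =
          pvBLoop t (i + 1) (some (fd.getD i), some i) := by simp [pvBLoop, hp]
      have hcnt0 : pvCnt ((p, m) :: t) = 0 := by simp [pvCnt, hp]
      by_cases ht : pvAllEq t
      · rw [hstep, pvBLoop_of_all t _ _ ht]
        have hc : pvCnt ((p, m) :: t).reverse = t.length := by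
          rw [hrev, pvCnt_append_of_all _ _ (pvAllEq_reverse t ht)]
          simp [pvCnt, hp]
        simp only [Prod.mk.injEq, Option.some.injEq, hcnt0, pvLast, hc, List.length_cons]
        refine ⟨?_, ?_⟩
        · congr 1; push_cast; ring
        · push_cast; ring
      · have hc : pvCnt ((p, m) :: t).reverse = pvCnt t.reverse := by
          rw [hrev, pvCnt_append_of_not _ _ (pvNotAllEq_reverse t ht)]
        rw [hstep, ih (i + 1) _ _ ht]
        simp only [Prod.mk.injEq, Option.some.injEq, Option.getD_some, hcnt0, pvLast, hc,
          List.length_cons]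
        refine ⟨?_, ?_⟩
        · congr 1; push_cast; ring
        · push_cast; ring

lemma pvZip_reverse (a b : List Char) (h : a.length = b.length) :
    a.reverse.zip b.reverse = (a.zip b).reverse := by
  induction a generalizing b with
  | nil => simp
  | cons x t ih =>
    cases b with
    | nil => simp at h
    | cons y u =>
      have h' : t.length = u.length := by simpa using h
      have hih := ih u h'
      simp only [List.zip] at hih ⊢
      rw [List.reverse_cons, List.reverse_cons,
        List.zipWith_append (h := by simp [h']), hih]
      simp

lemma pvUpper_length (s : List Char) : (PySem.Chars.upper s).length = s.length := by
  simp [PySem.Chars.upper]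

-- ===== VERDICT (by name: the statement is the Claim_ definition above) =====
theorem find_mutation_box_spec : Claim_equal_find_mutation_box := by
  intro parent child _ hpre
  unfold Spec_find_mutation_box find_mutation_box find_mutation_box_alt
  dsimp only
  set pu := PySem.Chars.upper parent.toList with hpu
  set cu := PySem.Chars.upper child.toList with hcu
  have hlen : pu.length = cu.length := by
    rw [hpu, hcu, pvUpper_length, pvUpper_length]; exact hpre
  set l := pu.zip cu with hl
  have hll : l.length = pu.length := by simp [hl, hlen]
  have hrevzip : pu.reverse.zip cu.reverse = l.reverse := pvZip_reverse pu cu hlen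
  rw [hrevzip, pvAOff_eq, pvALen_eq]
  by_cases hall : pvAllEq l
  · rw [pvBLoop_of_all l 0 (none, none) hall,
      pvCnt_eq_length l hall, pvCnt_eq_length l.reverse (pvAllEq_reverse l hall)]
    simp [hll]
  · rw [pvBLoop_of_not l 0 none none hall]
    simp only [Option.getD_none, pvLast, zero_add]
    have h2 : (pu.length : Int) - (pvCnt l.reverse : Int) =
        (l.length : Int) - 1 - (pvCnt l.reverse : Int) + 1 := by rw [hll]; ring
    rw [h2]
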